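-- pv_equiv track=rewrite | github.com/trungpro5398/Competitive-programming | CP problems/Codeforces/EducationalCodeforcesRound111(RatedforDiv.2).py | count
-- ===== SOURCE A (Python) =====
-- def count(a):
--     n = len(a)
--     for j in range(0, n):
--         for k in range(j + 1, n):
--             for k1 in range(k + 1, n):
--                 if min(a[j], a[k1]) <= a[k] <= max(a[j], a[k1]):
--                     return False
--     return True
-- ===== SOURCE B (Python) =====
-- def count(a):
--     if not a:
--         return True
--     a0, rest = a[0], a[1:]
--     m = len(rest)
--     # suffix (min, max) pairs of rest, built right-to-left
--     sufs = [None] * m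
--     for i in range(m - 1, -1, -1):
--         x = rest[i]
--         if i == m - 1:
--             sufs[i] = (x, x)
--         else:
--             sm, sM = sufs[i + 1]
--             sufs[i] = (min(x, sm), max(x, sM))
--     # one left-to-right pass over the middle candidates, maintaining prefix min/max
--     pm = pM = a0
--     for k in range(m - 1):
--         x = rest[k]
--         sm, sM = sufs[k + 1]
--         if (pm <= x <= sM) or (sm <= x <= pM):
--             return False
--         pm = min(pm, x)
--         pM = max(pM, x)
--     return True
-- ===== Notes on version B (the rewrite author's own statement) =====
-- stated objective: alternative
-- what changed: Replaces the triple nested scan over all index triples by precomputed suffix min/max pairs plus a single left-to-right pass maintaining prefix min/max, checking each middle element independently against its prefix and suffix extrema.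
import Mathlib
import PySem

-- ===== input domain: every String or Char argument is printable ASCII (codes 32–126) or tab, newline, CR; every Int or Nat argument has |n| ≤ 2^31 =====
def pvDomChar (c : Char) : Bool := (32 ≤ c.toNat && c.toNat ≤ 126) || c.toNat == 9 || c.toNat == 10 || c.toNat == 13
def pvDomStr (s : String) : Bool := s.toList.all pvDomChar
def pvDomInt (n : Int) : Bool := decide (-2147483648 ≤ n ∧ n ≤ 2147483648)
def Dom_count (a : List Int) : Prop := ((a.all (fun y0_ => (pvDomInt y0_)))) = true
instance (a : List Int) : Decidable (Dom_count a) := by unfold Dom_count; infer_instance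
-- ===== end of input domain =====

-- B replaces A's triple nested scan with suffix min/max pairs and one prefix-min/max pass per middle element.

-- ===== PORT A =====
-- A: triple nested loop over index triples j < k < k1, returning False on the first
-- triple with min(a[j],a[k1]) <= a[k] <= max(a[j],a[k1]).  Early return = any.
def count (a : List Int) : Bool :=
  let n := a.length
  ! (List.range' 0 n).any (fun j =>
      (List.range' (j+1) (n - (j+1))).any (fun k =>
        (List.range' (k+1) (n - (k+1))).any (fun k1 =>
          decide (min (a.getD j 0) (a.getD k1 0) ≤ a.getD k 0 ∧
                  a.getD k 0 ≤ max (a.getD j 0) (a.getD k1 0)))))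

-- ===== PORT B =====
-- suffix (min, max) pairs, built right-to-left (Source B's sufs array)
def sufMM : List Int → List (Int × Int)
  | [] => []
  | x :: xs =>
    match sufMM xs with
    | [] => [(x, x)]
    | (sm, sM) :: t => (min x sm, max x sM) :: (sm, sM) :: t

-- Source B's main loop: walk the middle candidates left to right, maintaining prefix min/max
def loopB (pm pM : Int) : List Int → List (Int × Int) → Bool
  | x :: y :: t, _ :: (sm, sM) :: st =>
    if (pm ≤ x ∧ x ≤ sM) ∨ (sm ≤ x ∧ x ≤ pM) then false
    else loopB (min pm x) (max pM x) (y :: t) ((sm, sM) :: st)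
  | _, _ => true

def count_alt (a : List Int) : Bool :=
  match a with
  | [] => true
  | a0 :: rest => loopB a0 a0 rest (sufMM rest)

-- ===== PRECONDITION & SPEC =====
def Spec_count (a : List Int) (out : Bool) : Prop := out = count_alt a
instance (a : List Int) (out : Bool) : Decidable (Spec_count a out) := by unfold Spec_count; infer_instance

-- ===== CLAIM (what is proved, stated in full; the proofs are below) =====
def Claim_equal_count : Prop := ∀ (a : List Int), Dom_count a → Spec_count a (count a)

-- ===== LEMMAS AND PROOFS =====

-- the condition both programs detect, in index form
def Trip (a : List Int) : Prop :=
  ∃ j k l : ℕ, j < k ∧ k < l ∧ l < a.length ∧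
    min (a.getD j 0) (a.getD l 0) ≤ a.getD k 0 ∧
    a.getD k 0 ≤ max (a.getD j 0) (a.getD l 0)

-- min/max of a nonempty list, foldl style
def fmin (h : Int) (l : List Int) : Int := l.foldl min h
def fmax (h : Int) (l : List Int) : Int := l.foldl max h
def sMin : List Int → Int
  | [] => 0
  | x :: t => fmin x t
def sMax : List Int → Int
  | [] => 0
  | x :: t => fmax x t

lemma fmin_le_iff (l : List Int) (h x : Int) :
    fmin h l ≤ x ↔ h ≤ x ∨ ∃ y ∈ l, y ≤ x := by
  induction l generalizing h with
  | nil => simp [fmin]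
  | cons c t ih =>
    simp only [fmin, List.foldl_cons] at *
    rw [ih (min h c)]
    constructor
    · rintro (hm | ⟨y, hy, hyx⟩)
      · rcases min_le_iff.mp hm with h1 | h1
        · exact Or.inl h1
        · exact Or.inr ⟨c, List.mem_cons_self .., h1⟩
      · exact Or.inr ⟨y, List.mem_cons_of_mem _ hy, hyx⟩
    · rintro (hh | ⟨y, hy, hyx⟩)
      · exact Or.inl (le_trans (min_le_left h c) hh)
      · rcases List.mem_cons.mp hy with rfl | hy'
        · exact Or.inl (le_trans (min_le_right _ _) hyx)
        · exact Or.inr ⟨y, hy', hyx⟩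

lemma le_fmax_iff (l : List Int) (h x : Int) :
    x ≤ fmax h l ↔ x ≤ h ∨ ∃ y ∈ l, x ≤ y := by
  induction l generalizing h with
  | nil => simp [fmax]
  | cons c t ih =>
    simp only [fmax, List.foldl_cons] at *
    rw [ih (max h c)]
    constructor
    · rintro (hm | ⟨y, hy, hyx⟩)
      · rcases le_max_iff.mp hm with h1 | h1
        · exact Or.inl h1
        · exact Or.inr ⟨c, List.mem_cons_self .., h1⟩
      · exact Or.inr ⟨y, List.mem_cons_of_mem _ hy, hyx⟩
    · rintro (hh | ⟨y, hy, hyx⟩)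
      · exact Or.inl (le_trans hh (le_max_left h c))
      · rcases List.mem_cons.mp hy with rfl | hy'
        · exact Or.inl (le_trans hyx (le_max_right _ _))
        · exact Or.inr ⟨y, hy', hyx⟩

lemma sMin_le_iff (l : List Int) (hl : l ≠ []) (x : Int) :
    sMin l ≤ x ↔ ∃ y ∈ l, y ≤ x := by
  cases l with
  | nil => exact absurd rfl hl
  | cons c t =>
    show fmin c t ≤ x ↔ _
    rw [fmin_le_iff]
    constructor
    · rintro (h | ⟨y, hy, hz⟩)
      · exact ⟨c, List.mem_cons_self .., h⟩
      · exact ⟨y, List.mem_cons_of_mem _ hy, hz⟩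
    · rintro ⟨y, hy, hz⟩
      rcases List.mem_cons.mp hy with rfl | hy'
      · exact Or.inl hz
      · exact Or.inr ⟨y, hy', hz⟩

lemma le_sMax_iff (l : List Int) (hl : l ≠ []) (x : Int) :
    x ≤ sMax l ↔ ∃ y ∈ l, x ≤ y := by
  cases l with
  | nil => exact absurd rfl hl
  | cons c t =>
    show x ≤ fmax c t ↔ _
    rw [le_fmax_iff]
    constructor
    · rintro (h | ⟨y, hy, hz⟩)
      · exact ⟨c, List.mem_cons_self .., h⟩
      · exact ⟨y, List.mem_cons_of_mem _ hy, hz⟩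
    · rintro ⟨y, hy, hz⟩
      rcases List.mem_cons.mp hy with rfl | hy'
      · exact Or.inl hz
      · exact Or.inr ⟨y, hy', hz⟩

lemma foldl_min_init (t : List Int) (x h : Int) :
    t.foldl min (min x h) = min x (t.foldl min h) := by
  induction t generalizing h with
  | nil => simp
  | cons c t' ih => simp only [List.foldl_cons]; rw [min_assoc, ih]

lemma foldl_max_init (t : List Int) (x h : Int) :
    t.foldl max (max x h) = max x (t.foldl max h) := by
  induction t generalizing h with
  | nil => simp
  | cons c t' ih => simp only [List.foldl_cons]; rw [max_assoc, ih]

-- sufMM's head is the (min, max) of the whole list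
lemma sufMM_cons (x : Int) (xs : List Int) :
    sufMM (x :: xs) = (sMin (x :: xs), sMax (x :: xs)) :: sufMM xs := by
  induction xs generalizing x with
  | nil => simp [sufMM, sMin, sMax, fmin, fmax]
  | cons y t ih =>
    rw [sufMM, ih y]
    have h1 : sMin (x :: y :: t) = min x (sMin (y :: t)) := by
      show (y :: t).foldl min x = _
      simp only [List.foldl_cons]
      rw [show min x y = min x y from rfl, foldl_min_init]
      rfl
    have h2 : sMax (x :: y :: t) = max x (sMax (y :: t)) := by
      show (y :: t).foldl max x = _
      simp only [List.foldl_cons]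
      rw [foldl_max_init]
      rfl
    rw [h1, h2]

lemma mem_iff_getD (l : List Int) (y : Int) :
    y ∈ l ↔ ∃ i : ℕ, i < l.length ∧ l.getD i 0 = y := by
  rw [List.mem_iff_getElem]
  constructor
  · rintro ⟨i, hi, rfl⟩; exact ⟨i, hi, by simp [List.getD_eq_getElem?_getD, List.getElem?_eq_getElem hi]⟩
  · rintro ⟨i, hi, rfl⟩; exact ⟨i, hi, by simp [List.getD_eq_getElem?_getD, List.getElem?_eq_getElem hi]⟩

lemma getD_take (l : List Int) (k i : ℕ) (hik : i < k) :
    (l.take k).getD i 0 = l.getD i 0 := by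
  by_cases h : i < l.length
  · simp [List.getD_eq_getElem?_getD, hik, h, List.getElem_take]
  · rw [List.getD_eq_getElem?_getD, List.getD_eq_getElem?_getD,
      List.getElem?_eq_none (by omega : l.length ≤ i),
      List.getElem?_eq_none (by simp [List.length_take]; omega : (l.take k).length ≤ i)]

lemma mem_take_iff (l : List Int) (k : ℕ) (y : Int) :
    y ∈ l.take k ↔ ∃ i : ℕ, i < k ∧ i < l.length ∧ l.getD i 0 = y := by
  rw [mem_iff_getD]
  constructor
  · rintro ⟨i, hi, rfl⟩
    simp only [List.length_take] at hi
    exact ⟨i, by omega, by omega, (getD_take l k i (by omega)).symm⟩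
  · rintro ⟨i, h1, h2, rfl⟩
    exact ⟨i, by simp [List.length_take]; omega, getD_take l k i h1⟩

lemma getD_drop (l : List Int) (k i : ℕ) :
    (l.drop k).getD i 0 = l.getD (k + i) 0 := by
  by_cases h : k + i < l.length
  · rw [List.getD_eq_getElem?_getD, List.getD_eq_getElem?_getD,
      List.getElem?_eq_getElem h,
      List.getElem?_eq_getElem (by simp [List.length_drop]; omega : i < (l.drop k).length)]
    simp [List.getElem_drop]
  · rw [List.getD_eq_getElem?_getD, List.getD_eq_getElem?_getD,
      List.getElem?_eq_none (by omega : l.length ≤ k + i),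
      List.getElem?_eq_none (by simp [List.length_drop]; omega : (l.drop k).length ≤ i)]

lemma mem_drop_iff (l : List Int) (k : ℕ) (y : Int) :
    y ∈ l.drop k ↔ ∃ i : ℕ, k ≤ i ∧ i < l.length ∧ l.getD i 0 = y := by
  rw [mem_iff_getD]
  constructor
  · rintro ⟨i, hi, rfl⟩
    simp only [List.length_drop] at hi
    exact ⟨k + i, by omega, by omega, (getD_drop l k i).symm⟩
  · rintro ⟨i, h1, h2, rfl⟩
    exact ⟨i - k, by simp [List.length_drop]; omega,
      by rw [getD_drop]; congr 1; omega⟩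

-- characterisation of Source B's main loop
lemma loopB_false_iff (l : List Int) (pm pM : Int) :
    loopB pm pM l (sufMM l) = false ↔
      ∃ k : ℕ, k + 1 < l.length ∧
        ((fmin pm (l.take k) ≤ l.getD k 0 ∧ l.getD k 0 ≤ sMax (l.drop (k+1))) ∨
         (sMin (l.drop (k+1)) ≤ l.getD k 0 ∧ l.getD k 0 ≤ fmax pM (l.take k))) := by
  induction l generalizing pm pM with
  | nil => simp [loopB]
  | cons x xs ih =>
    cases xs with
    | nil =>
      rw [sufMM_cons]
      constructor
      · intro h; simp [loopB.eq_def] at h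
      · rintro ⟨k, hk, -⟩; simp at hk
    | cons y t =>
      rw [sufMM_cons x (y :: t), sufMM_cons y t, loopB]
      by_cases hc : (pm ≤ x ∧ x ≤ sMax (y :: t)) ∨ (sMin (y :: t) ≤ x ∧ x ≤ pM)
      · rw [if_pos hc]
        simp only [true_iff]
        refine ⟨0, by simp, ?_⟩
        simpa [fmin, fmax, List.take, List.drop, List.getD] using hc
      · rw [if_neg hc, ← sufMM_cons y t, ih]
        constructor
        · rintro ⟨k, hk, hcond⟩
          refine ⟨k + 1, by simpa using Nat.succ_lt_succ hk, ?_⟩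
          simp only [List.take_succ_cons, List.getD_cons_succ, List.drop_succ_cons]
          simpa [fmin, fmax, List.foldl_cons] using hcond
        · rintro ⟨k, hk, hcond⟩
          cases k with
          | zero =>
            exfalso; apply hc
            simpa [fmin, fmax, List.take, List.getD] using hcond
          | succ k' =>
            refine ⟨k', by simpa using Nat.lt_of_succ_lt_succ hk, ?_⟩
            simp only [List.take_succ_cons, List.getD_cons_succ, List.drop_succ_cons] at hcond
            simpa [fmin, fmax, List.foldl_cons] using hcond

-- A's port detects exactly Trip
lemma count_false_iff (a : List Int) : count a = false ↔ Trip a := by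
  simp only [count, Trip, Bool.not_eq_false', List.any_eq_true, List.mem_range'_1,
    decide_eq_true_eq]
  constructor
  · rintro ⟨j, ⟨_, hj⟩, k, ⟨hk1, hk2⟩, l, ⟨hl1, hl2⟩, hcond⟩
    exact ⟨j, k, l, by omega, by omega, by omega, hcond⟩
  · rintro ⟨j, k, l, h1, h2, h3, hcond⟩
    exact ⟨j, ⟨by omega, by omega⟩, k, ⟨by omega, by omega⟩, l, ⟨by omega, by omega⟩, hcond⟩

-- B's port detects exactly Trip
lemma count_alt_false_iff (a : List Int) : count_alt a = false ↔ Trip a := by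
  cases a with
  | nil =>
    simp only [count_alt, Trip]
    constructor
    · intro h; simp at h
    · rintro ⟨j, k, l, -, -, hl, -⟩; simp at hl
  | cons a0 rest =>
    simp only [count_alt]
    rw [loopB_false_iff]
    constructor
    · rintro ⟨k, hk, hcond⟩
      -- middle index in a is k+1
      have hdrop_ne : rest.drop (k+1) ≠ [] := by
        intro h; have := congrArg List.length h; simp at this; omega
      rcases hcond with ⟨hmin, hmaxs⟩ | ⟨hmins, hmax⟩
      · rw [fmin_le_iff] at hmin
        rw [le_sMax_iff _ hdrop_ne] at hmaxs
        rcases hmaxs with ⟨z, hz, hzle⟩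
        rw [mem_drop_iff] at hz
        rcases hz with ⟨i, hi1, hi2, rfl⟩
        rcases hmin with hpm | ⟨y, hy, hyle⟩
        · -- j = 0 (a0)
          refine ⟨0, k + 1, i + 1, by omega, by omega, by simp; omega, ?_, ?_⟩ <;>
            simp only [List.getD_cons_zero, List.getD_cons_succ] <;> omega
        · rw [mem_take_iff] at hy
          rcases hy with ⟨p, hp1, hp2, rfl⟩
          refine ⟨p + 1, k + 1, i + 1, by omega, by omega, by simp; omega, ?_, ?_⟩ <;>
            simp only [List.getD_cons_succ] <;> omega
      · rw [le_fmax_iff] at hmax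
        rw [sMin_le_iff _ hdrop_ne] at hmins
        rcases hmins with ⟨z, hz, hzle⟩
        rw [mem_drop_iff] at hz
        rcases hz with ⟨i, hi1, hi2, rfl⟩
        rcases hmax with hpm | ⟨y, hy, hyle⟩
        · refine ⟨0, k + 1, i + 1, by omega, by omega, by simp; omega, ?_, ?_⟩ <;>
            simp only [List.getD_cons_zero, List.getD_cons_succ] <;> omega
        · rw [mem_take_iff] at hy
          rcases hy with ⟨p, hp1, hp2, rfl⟩
          refine ⟨p + 1, k + 1, i + 1, by omega, by omega, by simp; omega, ?_, ?_⟩ <;>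
            simp only [List.getD_cons_succ] <;> omega
    · rintro ⟨j, k, l, hjk, hkl, hl, hmin, hmax⟩
      simp only [List.length_cons] at hl
      -- k ≥ 1 and l ≥ 2, so the middle index in rest is k - 1
      obtain ⟨k', rfl⟩ : ∃ k', k = k' + 1 := ⟨k - 1, by omega⟩
      obtain ⟨l', rfl⟩ : ∃ l', l = l' + 2 := ⟨l - 2, by omega⟩
      refine ⟨k', by omega, ?_⟩
      simp only [List.getD_cons_succ] at hmin hmax
      have hdrop_ne : rest.drop (k'+1) ≠ [] := by
        intro h; have := congrArg List.length h; simp at this; omega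
      have hzmem : rest.getD (l' + 1) 0 ∈ rest.drop (k' + 1) := by
        rw [mem_drop_iff]; exact ⟨l' + 1, by omega, by omega, rfl⟩
      cases j with
      | zero =>
        simp only [List.getD_cons_zero] at hmin hmax
        rcases le_total a0 (rest.getD (l'+1) 0) with hcmp | hcmp
        · left
          constructor
          · rw [fmin_le_iff]; left; omega
          · rw [le_sMax_iff _ hdrop_ne]; exact ⟨_, hzmem, by omega⟩
        · right
          constructor
          · rw [sMin_le_iff _ hdrop_ne]; exact ⟨_, hzmem, by omega⟩
          · rw [le_fmax_iff]; left; omega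
      | succ j' =>
        simp only [List.getD_cons_succ] at hmin hmax
        have hymem : ∃ y ∈ rest.take k', y = rest.getD j' 0 := by
          refine ⟨rest.getD j' 0, ?_, rfl⟩
          rw [mem_take_iff]; exact ⟨j', by omega, by omega, rfl⟩
        rcases hymem with ⟨y, hy, rfl⟩
        rcases le_total (rest.getD j' 0) (rest.getD (l'+1) 0) with hcmp | hcmp
        · left
          constructor
          · rw [fmin_le_iff]; right; exact ⟨_, hy, by omega⟩
          · rw [le_sMax_iff _ hdrop_ne]; exact ⟨_, hzmem, by omega⟩
        · right
          constructor
          · rw [sMin_le_iff _ hdrop_ne]; exact ⟨_, hzmem, by omega⟩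
          · rw [le_fmax_iff]; right; exact ⟨_, hy, by omega⟩

-- ===== VERDICT (by name: the statement is the Claim_ definition above) =====
theorem count_spec : Claim_equal_count := by
  intro a _
  unfold Spec_count
  have h : count a = false ↔ count_alt a = false :=
    (count_false_iff a).trans (count_alt_false_iff a).symm
  cases hb : count_alt a with
  | false => exact h.mpr hb
  | true =>
    cases ha : count a with
    | false => rw [h.mp ha] at hb; exact absurd hb (by simp)
    | true => rfl
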